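-- pv_equiv track=rewrite | github.com/eliottcassidy2000/math | 04-computation/scalar_m_aut_anti_characterization.py | orbits_of_perms
-- ===== SOURCE A (Python) =====
-- def orbits_of_perms(perms, n):
--     parent = list(range(n))
--     def find(x):
--         while parent[x] != x:
--             parent[x] = parent[parent[x]]
--             x = parent[x]
--         return x
--     def union(x, y):
--         px, py = find(x), find(y)
--         if px != py:
--             parent[px] = py
--     for perm in perms:
--         for i in range(n):
--             union(i, perm[i])
--     orbs = {}
--     for i in range(n):
--         r = find(i)
--         if r not in orbs:
--             orbs[r] = []
--         orbs[r].append(i)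
--     return list(orbs.values())
-- ===== SOURCE B (Python) =====
-- def orbits_of_perms(perms, n):
--     label = list(range(n))
--     for perm in perms:
--         for i in range(n):
--             a, b = label[i], label[perm[i]]
--             if a != b:
--                 label = [b if x == a else x for x in label]
--     orbs = {}
--     for i in range(n):
--         orbs.setdefault(label[i], []).append(i)
--     return list(orbs.values())
-- ===== Notes on version B (the rewrite author's own statement) =====
-- stated objective: simpler
-- what changed: Replaces the union-find machinery (parent forest, path-halving find, union) by a single label array that is merged by rewriting one label class per edge, then groups indices by label; no helper functions, no mutation-heavy find loop.
import Mathlib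
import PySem

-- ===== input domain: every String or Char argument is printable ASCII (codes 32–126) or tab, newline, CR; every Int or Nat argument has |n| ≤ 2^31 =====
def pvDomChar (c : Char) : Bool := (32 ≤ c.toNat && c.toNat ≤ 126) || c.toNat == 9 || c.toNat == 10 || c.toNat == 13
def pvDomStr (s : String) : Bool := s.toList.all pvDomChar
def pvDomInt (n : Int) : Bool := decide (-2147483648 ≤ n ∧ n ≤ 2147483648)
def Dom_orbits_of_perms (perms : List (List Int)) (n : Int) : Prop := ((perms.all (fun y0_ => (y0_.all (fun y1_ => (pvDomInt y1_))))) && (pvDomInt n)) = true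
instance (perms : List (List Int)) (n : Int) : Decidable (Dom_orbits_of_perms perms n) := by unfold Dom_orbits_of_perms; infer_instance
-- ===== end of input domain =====

-- B replaces A's union-find (parent forest, path-halving find, union) by direct label
-- merging: one label array, each edge rewrites the smaller-scoped label class; simpler code,
-- same return value on every input where A returns (Pre_ excludes exactly A's IndexErrors).

-- ===== PORT A =====
-- find's while loop is ported with a fuel counter (totality guard only; under Pre_ the
-- fuel provably suffices, so the fuel-0 branch is never reached).
def pvFindGo : Nat → List Int → Int → Int × List Int
  | 0, parent, x => (x, parent)
  | f+1, parent, x =>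
    if PySem.List.pyGetD parent x 0 ≠ x then
      let parent' := PySem.List.pySetD parent x
        (PySem.List.pyGetD parent (PySem.List.pyGetD parent x 0) 0)
      pvFindGo f parent' (PySem.List.pyGetD parent' x 0)
    else (x, parent)

def pvUnion (F : Nat) (parent : List Int) (x y : Int) : List Int :=
  let r1 := pvFindGo F parent x
  let r2 := pvFindGo F r1.2 y
  if r1.1 ≠ r2.1 then PySem.List.pySetD r2.2 r1.1 r2.1 else r2.2

def orbits_of_perms (perms : List (List Int)) (n : Int) : List (List Int) :=
  let F := n.toNat * perms.length + 2
  let parent0 := PySem.List.pyRange 0 n 1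
  let parent1 := perms.foldl (fun parent perm =>
    (PySem.List.pyRange 0 n 1).foldl (fun parent i =>
      pvUnion F parent i (PySem.List.pyGetD perm i 0)) parent) parent0
  let res := (PySem.List.pyRange 0 n 1).foldl
    (fun (st : List Int × PySem.Dict Int (List Int)) i =>
      let fr := pvFindGo F st.1 i
      let orbs := if st.2.contains fr.1 = false then st.2.insert fr.1 [] else st.2
      (fr.2, orbs.modify fr.1 [] (fun l => l ++ [i])))
    (parent1, PySem.Dict.empty)
  res.2.values

-- ===== PORT B =====
def orbits_of_perms_alt (perms : List (List Int)) (n : Int) : List (List Int) :=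
  let label := perms.foldl (fun label perm =>
    (PySem.List.pyRange 0 n 1).foldl (fun label i =>
      let a := PySem.List.pyGetD label i 0
      let b := PySem.List.pyGetD label (PySem.List.pyGetD perm i 0) 0
      if a ≠ b then label.map (fun x => if x = a then b else x) else label) label)
    (PySem.List.pyRange 0 n 1)
  let orbs := (PySem.List.pyRange 0 n 1).foldl (fun orbs i =>
      (PySem.Dict.setdefault orbs (PySem.List.pyGetD label i 0) []).modify
        (PySem.List.pyGetD label i 0) [] (fun l => l ++ [i]))
    PySem.Dict.empty
  orbs.values

-- ===== PRECONDITION & SPEC =====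
-- Pre_ excludes exactly the inputs where A raises IndexError: some perm shorter than n,
-- or an entry perm[i] (i < n) outside [-n, n).
def Pre_orbits_of_perms (perms : List (List Int)) (n : Int) : Prop :=
  ∀ perm ∈ perms, n ≤ (perm.length : Int) ∧ ∀ x ∈ perm.take n.toNat, -n ≤ x ∧ x < n
instance (perms : List (List Int)) (n : Int) : Decidable (Pre_orbits_of_perms perms n) := by
  unfold Pre_orbits_of_perms; infer_instance

def pvWitness_orbits_of_perms : List (List Int) × Int := ([[1, 0, 2], [0, 2, 1]], 3)

def Spec_orbits_of_perms (perms : List (List Int)) (n : Int) (out : List (List Int)) : Prop := out = orbits_of_perms_alt perms n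
instance (perms : List (List Int)) (n : Int) (out : List (List Int)) : Decidable (Spec_orbits_of_perms perms n out) := by unfold Spec_orbits_of_perms; infer_instance

-- ===== CLAIM (what is proved, stated in full; the proofs are below) =====
def Claim_equal_orbits_of_perms : Prop := ∀ (perms : List (List Int)) (n : Int), Dom_orbits_of_perms perms n → Pre_orbits_of_perms perms n → Spec_orbits_of_perms perms n (orbits_of_perms perms n)

-- ===== LEMMAS AND PROOFS =====
def fget (p : List Int) (x : Int) : Int := PySem.List.pyGetD p x 0

lemma fget_nonneg (p : List Int) (x : Int) (h1 : 0 ≤ x) (h2 : x < (p.length : Int)) :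
    fget p x = p[x.toNat]! := by
  have hx : x.toNat < p.length := by omega
  simp [fget, PySem.List.pyGetD, PySem.List.pyGet?, PySem.List.pyIdx?, h1, h2, List.getElem?_eq_getElem hx, getElem!_pos, hx]

lemma fget_neg (p : List Int) (x : Int) (h1 : -(p.length : Int) ≤ x) (h2 : x < 0) :
    fget p x = fget p (x + p.length) := by
  have hnx : ¬ (0 ≤ x) := by omega
  have h3 : 0 ≤ x + p.length := by omega
  have h4 : x + p.length < (p.length : Int) := by omega
  have : p.length - (-x).toNat = (x + p.length).toNat := by omega
  simp [fget, PySem.List.pyGetD, PySem.List.pyGet?, PySem.List.pyIdx?, hnx, h1, h2, h3, h4, this]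

lemma fset_neg (p : List Int) (x : Int) (v : Int) (h1 : -(p.length : Int) ≤ x) (h2 : x < 0) :
    PySem.List.pySetD p x v = PySem.List.pySetD p (x + p.length) v := by
  have hnx : ¬ (0 ≤ x) := by omega
  have h3 : 0 ≤ x + p.length := by omega
  have h4 : x + p.length < (p.length : Int) := by omega
  have : p.length - (-x).toNat = (x + p.length).toNat := by omega
  simp [PySem.List.pySetD, PySem.List.pySet?, PySem.List.pyIdx?, hnx, h1, h2, h3, h4, this]

lemma length_fset (p : List Int) (x v : Int) : (PySem.List.pySetD p x v).length = p.length :=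
  PySem.List.length_pySetD p x v

lemma fget_set_self (p : List Int) (x v : Int) (h1 : 0 ≤ x) (h2 : x < (p.length : Int)) :
    fget (PySem.List.pySetD p x v) x = v := by
  have hx : x.toNat < p.length := by omega
  rw [PySem.List.pySetD_of_nonneg _ _ h1,
    fget_nonneg _ _ h1 (by simp; omega)]
  simp [getElem!_pos, hx, List.getElem_set]

lemma fget_set_ne (p : List Int) (x v y : Int) (h1 : 0 ≤ x) (h3 : 0 ≤ y)
    (hne : y ≠ x) : fget (PySem.List.pySetD p x v) y = fget p y := by
  rw [PySem.List.pySetD_of_nonneg _ _ h1]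
  by_cases hy : y < (p.length : Int)
  · rw [fget_nonneg _ _ h3 (by simp; omega), fget_nonneg _ _ h3 hy]
    have : y.toNat ≠ x.toNat := by omega
    simp [getElem!_pos, (by omega : y.toNat < p.length), List.getElem_set, this.symm]
  · -- out of range: both sides default 0
    have hy' : ¬ (y < ((PySem.List.pySetD p x v).length : Int)) := by
      rw [length_fset]; exact hy
    simp [fget, PySem.List.pyGetD, PySem.List.pyGet?, PySem.List.pyIdx?, h3, hy, length_fset, hy']

lemma fset_self_id (p : List Int) (x : Int) (h1 : 0 ≤ x) (h2 : x < (p.length : Int)) :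
    PySem.List.pySetD p x (fget p x) = p := by
  have hx : x.toNat < p.length := by omega
  rw [PySem.List.pySetD_of_nonneg _ _ h1, fget_nonneg _ _ h1 h2]
  simp [getElem!_pos, hx, List.set_getElem_self]

def itf (p : List Int) : Nat → Int → Int
  | 0, x => x
  | k+1, x => itf p k (fget p x)

def UFInv (n : Int) (t : Nat) (p lab : List Int) : Prop :=
  p.length = n.toNat ∧ lab.length = n.toNat ∧
  ∀ x : Int, 0 ≤ x → x < n →
    (0 ≤ fget lab x ∧ fget lab x < n ∧ fget lab (fget lab x) = fget lab x ∧
      fget p (fget lab x) = fget lab x) ∧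
    (0 ≤ fget p x ∧ fget p x < n ∧ fget lab (fget p x) = fget lab x) ∧
    (∃ k ≤ t, itf p k x = fget lab x)

lemma itf_fix (p : List Int) (x : Int) (h : fget p x = x) : ∀ k, itf p k x = x := by
  intro k; induction k with
  | zero => rfl
  | succ k ih => simpa [itf, h] using ih

lemma halve_dist (p lab : List Int) (n : Int) (x : Int)
    (hlen : p.length = n.toNat)
    (hpv : ∀ z : Int, 0 ≤ z → z < n → 0 ≤ fget p z ∧ fget p z < n ∧ fget lab (fget p z) = fget lab z)
    (hlabfix : ∀ z : Int, 0 ≤ z → z < n → fget p (fget lab z) = fget lab z)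
    (hx0 : 0 ≤ x) (hxn : x < n) :
    ∀ k z, 0 ≤ z → z < n → itf p k z = fget lab z →
      ∃ k' ≤ k, itf (PySem.List.pySetD p x (fget p (fget p x))) k' z = fget lab z := by
  have hxl : x < (p.length : Int) := by omega
  have hset_x : fget (PySem.List.pySetD p x (fget p (fget p x))) x = fget p (fget p x) :=
    fget_set_self _ _ _ hx0 hxl
  have hset_ne : ∀ z : Int, 0 ≤ z → z ≠ x →
      fget (PySem.List.pySetD p x (fget p (fget p x))) z = fget p z := by
    intro z hz hne; exact fget_set_ne _ _ _ _ hx0 hz hne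
  intro k
  induction k using Nat.strong_induction_on with
  | _ k IH =>
    intro z hz0 hzn hit
    match k, hit with
    | 0, hit => exact ⟨0, le_refl _, hit⟩
    | Nat.succ k0, hit =>
      by_cases hzx : z = x
      · subst hzx
        match k0, hit with
        | 0, hit =>
          -- fget p z = lab z
          refine ⟨1, by omega, ?_⟩
          have h2 : fget p (fget p z) = fget lab z := by
            rw [show fget p z = fget lab z from hit]
            exact hlabfix z hz0 hzn
          simpa [itf, hset_x] using h2
        | Nat.succ k1, hit =>
          -- itf p k1 w2 = lab z where w2 = fget p (fget p z)
          obtain ⟨h1, h2, h3⟩ := hpv z hz0 hzn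
          obtain ⟨h4, h5, h6⟩ := hpv _ h1 h2
          have hw2 : itf p k1 (fget p (fget p z)) = fget lab (fget p (fget p z)) := by
            rw [h6, h3]; exact hit
          obtain ⟨k', hk'le, hk'⟩ := IH k1 (by omega) _ h4 h5 hw2
          refine ⟨k' + 1, by omega, ?_⟩
          rw [h6, h3] at hk'
          simpa [itf, hset_x] using hk'
      · obtain ⟨h1, h2, h3⟩ := hpv z hz0 hzn
        have hw : itf p k0 (fget p z) = fget lab (fget p z) := by rw [h3]; exact hit
        obtain ⟨k', hk'le, hk'⟩ := IH k0 (by omega) _ h1 h2 hw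
        refine ⟨k' + 1, by omega, ?_⟩
        rw [h3] at hk'
        simpa [itf, hset_ne z hz0 hzx] using hk'

lemma UFInv.halve (n : Int) (t : Nat) (p lab : List Int) (x : Int)
    (hInv : UFInv n t p lab) (hx0 : 0 ≤ x) (hxn : x < n) :
    UFInv n t (PySem.List.pySetD p x (fget p (fget p x))) lab := by
  obtain ⟨hlen, hlablen, hmain⟩ := hInv
  have hxl : x < (p.length : Int) := by omega
  have hset_x : fget (PySem.List.pySetD p x (fget p (fget p x))) x = fget p (fget p x) :=
    fget_set_self _ _ _ hx0 hxl
  have hset_ne : ∀ z : Int, 0 ≤ z → z ≠ x →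
      fget (PySem.List.pySetD p x (fget p (fget p x))) z = fget p z := by
    intro z hz hne; exact fget_set_ne _ _ _ _ hx0 hz hne
  refine ⟨by rw [length_fset]; exact hlen, hlablen, ?_⟩
  intro z hz0 hzn
  obtain ⟨⟨l1, l2, l3, l4⟩, ⟨p1, p2, p3⟩, hdist⟩ := hmain z hz0 hzn
  refine ⟨⟨l1, l2, l3, ?_⟩, ?_, ?_⟩
  · -- lab z is a fixpoint of p'; lab z ≠ x unless x itself is a fixpoint
    by_cases hlx : fget lab z = x
    · rw [hlx]; rw [hlx] at l4; rw [hset_x, l4, l4]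
    · rw [hset_ne _ l1 hlx]; exact l4
  · by_cases hzx : z = x
    · subst hzx
      obtain ⟨q1, q2, q3⟩ := hmain _ p1 p2
      rw [hset_x]
      exact ⟨q2.1, q2.2.1, by rw [q2.2.2, p3]⟩
    · rw [hset_ne z hz0 hzx]; exact ⟨p1, p2, p3⟩
  · obtain ⟨k, hkt, hk⟩ := hdist
    obtain ⟨k', hk'le, hk'⟩ := halve_dist p lab n x hlen
      (fun w hw1 hw2 => (hmain w hw1 hw2).2.1)
      (fun w hw1 hw2 => ((hmain w hw1 hw2).1).2.2.2) hx0 hxn k z hz0 hzn hk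
    exact ⟨k', by omega, hk'⟩

lemma find_correct (n : Int) (t : Nat) (lab : List Int) :
    ∀ (k f : Nat) (p : List Int) (x : Int), UFInv n t p lab → 0 ≤ x → x < n →
      itf p k x = fget lab x → k < f →
      ∃ p', pvFindGo f p x = (fget lab x, p') ∧ UFInv n t p' lab := by
  intro k
  induction k using Nat.strong_induction_on with
  | _ k IH =>
    intro f p x hInv hx0 hxn hit hkf
    obtain ⟨hlen, hlablen, hmain⟩ := hInv
    obtain ⟨⟨l1, l2, l3, l4⟩, ⟨p1, p2, p3⟩, -⟩ := hmain x hx0 hxn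
    match f, hkf with
    | f0+1, hkf =>
    by_cases hroot : fget p x = x
    · have hxlab : x = fget lab x := by rw [← hit, itf_fix p x hroot]
      refine ⟨p, ?_, ⟨hlen, hlablen, hmain⟩⟩
      simp [pvFindGo, show PySem.List.pyGetD p x 0 = x from hroot, ← hxlab]
    · have hxl : x < (p.length : Int) := by omega
      set p' := PySem.List.pySetD p x (fget p (fget p x)) with hp'
      have hInv' : UFInv n t p' lab := UFInv.halve n t p lab x ⟨hlen, hlablen, hmain⟩ hx0 hxn
      have hx' : fget p' x = fget p (fget p x) := fget_set_self _ _ _ hx0 hxl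
      obtain ⟨q1, q2, q3⟩ := (hmain _ p1 p2).2.1
      have hlabx' : fget lab (fget p (fget p x)) = fget lab x := by rw [q3, p3]
      match k, hit with
      | 0, hit =>
        have hx : x = fget lab x := hit
        exact absurd (by
          calc fget p x = fget p (fget lab x) := by rw [← hx]
          _ = fget lab x := l4
          _ = x := hx.symm) hroot
      | 1, hit =>
        -- fget p x = lab x, so x' = lab x
        have hfx : fget p x = fget lab x := hit
        have hx'v : fget p' x = fget lab x := by rw [hx', hfx, l4]
        have : itf p' 0 (fget p' x) = fget lab (fget p' x) := by
          simp [itf, hx'v, l3]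
        obtain ⟨p'', heq, hI⟩ := IH 0 (by omega) f0 p' (fget p' x) hInv'
          (by rw [hx'v]; exact l1) (by rw [hx'v]; exact l2) this (by omega)
        refine ⟨p'', ?_, hI⟩
        rw [show fget lab (fget p' x) = fget lab x from by rw [hx'v, l3]] at heq
        rw [← heq]
        simp only [pvFindGo]
        rw [if_pos (show PySem.List.pyGetD p x 0 ≠ x from hroot)]
        rfl
      | (k1+2), hit =>
        have hw2 : itf p (k1+1) (fget p x) = fget lab x := hit
        have hw3 : itf p k1 (fget p (fget p x)) = fget lab (fget p (fget p x)) := by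
          rw [hlabx']; exact hw2
        obtain ⟨k', hk'le, hk'⟩ := halve_dist p lab n x hlen
          (fun w hw1 hw2 => (hmain w hw1 hw2).2.1)
          (fun w hw1 hw2 => ((hmain w hw1 hw2).1).2.2.2) hx0 hxn k1 _ q1 q2 hw3
        obtain ⟨p'', heq, hI⟩ := IH k' (by omega) f0 p' (fget p' x) hInv'
          (by rw [hx']; exact q1) (by rw [hx']; exact q2) (by rw [hx']; exact hk') (by omega)
        refine ⟨p'', ?_, hI⟩
        rw [show fget lab (fget p' x) = fget lab x from by rw [hx']; exact hlabx'] at heq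
        rw [← heq]
        simp only [pvFindGo]
        rw [if_pos (show PySem.List.pyGetD p x 0 ≠ x from hroot)]
        rfl

lemma find_correct' (n : Int) (t : Nat) (p lab : List Int) (x : Int) (f : Nat)
    (hInv : UFInv n t p lab) (hx0 : 0 ≤ x) (hxn : x < n) (hf : t < f) :
    ∃ p', pvFindGo f p x = (fget lab x, p') ∧ UFInv n t p' lab := by
  obtain ⟨k, hkt, hk⟩ := (hInv.2.2 x hx0 hxn).2.2
  exact find_correct n t lab k f p x hInv hx0 hxn hk (by omega)

lemma find_neg (n : Int) (t : Nat) (p lab : List Int) (y : Int) (f : Nat)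
    (hInv : UFInv n t p lab) (hy1 : -n ≤ y) (hy2 : y < 0) (hf : 2 ≤ f) :
    pvFindGo f p y = pvFindGo f p (y + n) := by
  obtain ⟨hlen, hlablen, hmain⟩ := hInv
  have hn : 0 < n := by omega
  have hlc : (p.length : Int) = n := by omega
  have hy3 : 0 ≤ y + n := by omega
  have hy4 : y + n < n := by omega
  obtain ⟨-, ⟨p1, p2, -⟩, -⟩ := hmain (y + n) hy3 hy4
  have hget : fget p y = fget p (y + n) := by
    have := fget_neg p y (by omega) hy2; rwa [hlc] at this
  have hcond : fget p y ≠ y := by omega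
  have hset : ∀ v, PySem.List.pySetD p y v = PySem.List.pySetD p (y + n) v := by
    intro v; have := fset_neg p y v (by omega) hy2; rwa [hlc] at this
  match f, hf with
  | f0+2, _ =>
  by_cases hroot : fget p (y + n) = y + n
  · have hpid : PySem.List.pySetD p y (fget p (fget p y)) = p := by
      rw [hset, hget, hroot]
      exact fset_self_id p (y + n) hy3 (by omega)
    have hstep : pvFindGo (f0+2) p y = pvFindGo (f0+1) p (y + n) := by
      simp only [pvFindGo]
      rw [if_pos (show PySem.List.pyGetD p y 0 ≠ y from hcond)]
      rw [show PySem.List.pySetD p y (PySem.List.pyGetD p (PySem.List.pyGetD p y 0) 0) = p from hpid]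
      rw [show PySem.List.pyGetD p y 0 = y + n from by rw [show PySem.List.pyGetD p y 0 = fget p y from rfl, hget, hroot]]
    have h1 : pvFindGo (f0+1) p (y+n) = (y+n, p) := by
      simp [pvFindGo, show PySem.List.pyGetD p (y+n) 0 = y+n from hroot]
    have h2 : pvFindGo (f0+2) p (y+n) = (y+n, p) := by
      simp [pvFindGo, show PySem.List.pyGetD p (y+n) 0 = y+n from hroot]
    rw [hstep, h1, h2]
  · have hrcond : fget p (y + n) ≠ y + n := hroot
    have hpeq : PySem.List.pySetD p y (fget p (fget p y)) =
        PySem.List.pySetD p (y + n) (fget p (fget p (y + n))) := by rw [hset, hget]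
    have hx1 : fget (PySem.List.pySetD p (y + n) (fget p (fget p (y + n)))) y =
        fget (PySem.List.pySetD p (y + n) (fget p (fget p (y + n)))) (y + n) := by
      have hl : ((PySem.List.pySetD p (y + n) (fget p (fget p (y + n)))).length : Int) = n := by
        rw [length_fset]; omega
      have := fget_neg (PySem.List.pySetD p (y + n) (fget p (fget p (y + n)))) y
        (by rw [hl]; omega) hy2
      rwa [hl] at this
    simp only [pvFindGo]
    rw [if_pos (show PySem.List.pyGetD p y 0 ≠ y from hcond),
        if_pos (show PySem.List.pyGetD p (y+n) 0 ≠ (y+n) from hrcond)]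
    rw [show PySem.List.pySetD p y (PySem.List.pyGetD p (PySem.List.pyGetD p y 0) 0) =
        PySem.List.pySetD p (y + n) (PySem.List.pyGetD p (PySem.List.pyGetD p (y+n) 0) 0) from hpeq]
    rw [show PySem.List.pyGetD (PySem.List.pySetD p (y + n) (PySem.List.pyGetD p (PySem.List.pyGetD p (y+n) 0) 0)) y 0 = PySem.List.pyGetD (PySem.List.pySetD p (y + n) (PySem.List.pyGetD p (PySem.List.pyGetD p (y+n) 0) 0)) (y+n) 0 from hx1]

lemma relabel_path_to (p : List Int) (n a b : Int)
    (hlen : p.length = n.toNat)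
    (hpv : ∀ z : Int, 0 ≤ z → z < n → 0 ≤ fget p z ∧ fget p z < n)
    (ha0 : 0 ≤ a) (han : a < n) (hb0 : 0 ≤ b) (hbn : b < n)
    (hpb : fget p b = b) (hab : a ≠ b) :
    ∀ m u, 0 ≤ u → u < n → itf p m u = a →
      itf (PySem.List.pySetD p a b) (m+1) u = b := by
  have hal : a < (p.length : Int) := by omega
  have hset_a : fget (PySem.List.pySetD p a b) a = b := fget_set_self _ _ _ ha0 hal
  have hset_ne : ∀ z : Int, 0 ≤ z → z ≠ a → fget (PySem.List.pySetD p a b) z = fget p z :=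
    fun z hz hne => fget_set_ne _ _ _ _ ha0 hz hne
  have hfixb : fget (PySem.List.pySetD p a b) b = b := by
    rw [hset_ne b hb0 (Ne.symm hab)]; exact hpb
  intro m
  induction m with
  | zero =>
    intro u hu0 hun hit
    have : u = a := hit
    subst this
    simp [itf, hset_a]
  | succ m ih =>
    intro u hu0 hun hit
    by_cases hua : u = a
    · subst hua
      show itf (PySem.List.pySetD p u b) (m+1) (fget (PySem.List.pySetD p u b) u) = b
      rw [hset_a, itf_fix _ _ hfixb]
    · obtain ⟨h1, h2⟩ := hpv u hu0 hun
      have := ih (fget p u) h1 h2 hit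
      show itf (PySem.List.pySetD p a b) (m+1) (fget (PySem.List.pySetD p a b) u) = b
      rw [hset_ne u hu0 hua]
      exact this

lemma relabel_path_avoid (p lab : List Int) (n a b : Int)
    (hlen : p.length = n.toNat)
    (hpv : ∀ z : Int, 0 ≤ z → z < n → 0 ≤ fget p z ∧ fget p z < n ∧ fget lab (fget p z) = fget lab z)
    (ha0 : 0 ≤ a) (han : a < n) (hlaba : fget lab a = a) :
    ∀ m u, 0 ≤ u → u < n → itf p m u = fget lab u → fget lab u ≠ a →
      itf (PySem.List.pySetD p a b) m u = fget lab u := by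
  have hset_ne : ∀ z : Int, 0 ≤ z → z ≠ a → fget (PySem.List.pySetD p a b) z = fget p z :=
    fun z hz hne => fget_set_ne _ _ _ _ ha0 hz hne
  intro m
  induction m with
  | zero => intro u _ _ hit _; exact hit
  | succ m ih =>
    intro u hu0 hun hit hne
    by_cases hua : u = a
    · exact absurd (by subst hua; exact hlaba) hne
    · obtain ⟨h1, h2, h3⟩ := hpv u hu0 hun
      have := ih (fget p u) h1 h2 (by rw [h3]; exact hit) (by rw [h3]; exact hne)
      show itf (PySem.List.pySetD p a b) m (fget (PySem.List.pySetD p a b) u) = fget lab u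
      rw [hset_ne u hu0 hua, ← h3]
      exact this

lemma fget_map_relabel (lab : List Int) (a b z : Int) (hz0 : 0 ≤ z) (hzl : z < (lab.length : Int)) :
    fget (lab.map (fun x => if x = a then b else x)) z =
      (fun x => if x = a then b else x) (fget lab z) := by
  have hz : z.toNat < lab.length := by omega
  rw [fget_nonneg _ _ hz0 (by simpa using hzl),
      fget_nonneg _ _ hz0 (by simpa using hzl)]
  simp [getElem!_pos, hz, List.getElem_map]

lemma UFInv.relabel (n : Int) (t : Nat) (p lab : List Int) (a b : Int)
    (hInv : UFInv n t p lab)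
    (ha0 : 0 ≤ a) (han : a < n) (hlaba : fget lab a = a) (hpa : fget p a = a)
    (hb0 : 0 ≤ b) (hbn : b < n) (hlabb : fget lab b = b) (hpb : fget p b = b)
    (hab : a ≠ b) :
    UFInv n (t+1) (PySem.List.pySetD p a b)
      (lab.map (fun x => if x = a then b else x)) := by
  obtain ⟨hlen, hlablen, hmain⟩ := hInv
  have hal : a < (p.length : Int) := by omega
  have hset_a : fget (PySem.List.pySetD p a b) a = b := fget_set_self _ _ _ ha0 hal
  have hset_ne : ∀ z : Int, 0 ≤ z → z ≠ a → fget (PySem.List.pySetD p a b) z = fget p z :=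
    fun z hz hne => fget_set_ne _ _ _ _ ha0 hz hne
  have flab : ∀ z : Int, 0 ≤ z → z < n →
      fget (lab.map (fun x => if x = a then b else x)) z =
        if fget lab z = a then b else fget lab z := by
    intro z hz0 hzn
    exact fget_map_relabel lab a b z hz0 (by omega)
  refine ⟨by rw [length_fset]; exact hlen, by rw [List.length_map]; exact hlablen, ?_⟩
  intro z hz0 hzn
  obtain ⟨⟨l1, l2, l3, l4⟩, ⟨p1, p2, p3⟩, hdist⟩ := hmain z hz0 hzn
  refine ⟨⟨?_, ?_, ?_, ?_⟩, ?_, ?_⟩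
  · rw [flab z hz0 hzn]; split <;> omega
  · rw [flab z hz0 hzn]; split <;> omega
  · rw [flab z hz0 hzn]
    by_cases hLa : fget lab z = a
    · rw [if_pos hLa, flab b hb0 hbn, hlabb, if_neg (Ne.symm hab)]
    · rw [if_neg hLa, flab _ l1 l2, l3, if_neg hLa]
  · rw [flab z hz0 hzn]
    by_cases hLa : fget lab z = a
    · rw [if_pos hLa, hset_ne b hb0 (Ne.symm hab)]; exact hpb
    · rw [if_neg hLa, hset_ne _ l1 hLa]; exact l4
  · by_cases hza : z = a
    · subst hza
      rw [hset_a]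
      refine ⟨hb0, hbn, ?_⟩
      rw [flab b hb0 hbn, hlabb, if_neg (Ne.symm hab), flab _ hz0 hzn, hlaba, if_pos rfl]
    · rw [hset_ne z hz0 hza]
      refine ⟨p1, p2, ?_⟩
      rw [flab _ p1 p2, p3, flab _ hz0 hzn]
  · obtain ⟨k, hkt, hk⟩ := hdist
    rw [flab z hz0 hzn]
    by_cases hLa : fget lab z = a
    · rw [if_pos hLa]
      refine ⟨k + 1, by omega, ?_⟩
      exact relabel_path_to p n a b hlen
        (fun w hw1 hw2 => ⟨(hmain w hw1 hw2).2.1.1, (hmain w hw1 hw2).2.1.2.1⟩)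
        ha0 han hb0 hbn hpb hab k z hz0 hzn (by rw [← hLa]; exact hk)
    · rw [if_neg hLa]
      refine ⟨k, by omega, ?_⟩
      exact relabel_path_avoid p lab n a b hlen
        (fun w hw1 hw2 => (hmain w hw1 hw2).2.1) ha0 han hlaba k z hz0 hzn hk hLa

lemma fget_lab_neg (n : Int) (lab : List Int) (hlablen : lab.length = n.toNat) (j : Int)
    (hj1 : -n ≤ j) (hj2 : j < 0) : fget lab j = fget lab (j + n) := by
  have hlc : (lab.length : Int) = n := by omega
  have := fget_neg lab j (by omega) hj2
  rwa [hlc] at this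

lemma union_step (n : Int) (t F : Nat) (p lab : List Int) (i j : Int)
    (hInv : UFInv n t p lab) (hi0 : 0 ≤ i) (hin : i < n) (hj1 : -n ≤ j) (hj2 : j < n)
    (hF : t + 2 ≤ F) :
    ∃ t' ≤ t + 1, UFInv n t' (pvUnion F p i j)
      (if fget lab i ≠ fget lab j then
        lab.map (fun x => if x = fget lab i then fget lab j else x) else lab) := by
  obtain ⟨p1, hp1, hInv1⟩ := find_correct' n t p lab i F hInv hi0 hin (by omega)
  -- normalized second argument
  have hmain := hInv.2.2
  have hlablen := hInv.2.1
  by_cases hjneg : j < 0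
  · have hj0' : 0 ≤ j + n := by omega
    have hjn' : j + n < n := by omega
    have hlabj : fget lab j = fget lab (j + n) := fget_lab_neg n lab hlablen j hj1 hjneg
    obtain ⟨p2, hp2, hInv2⟩ := find_correct' n t p1 lab (j + n) F hInv1 hj0' hjn' (by omega)
    have hfneg : pvFindGo F p1 j = pvFindGo F p1 (j + n) :=
      find_neg n t p1 lab j F hInv1 hj1 hjneg (by omega)
    obtain ⟨⟨li1, li2, li3, li4⟩, -, -⟩ := hInv2.2.2 i hi0 hin
    obtain ⟨⟨lj1, lj2, lj3, lj4⟩, -, -⟩ := hInv2.2.2 (j + n) hj0' hjn'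
    rw [hlabj]
    unfold pvUnion
    rw [hp1]
    simp only [hfneg, hp2]
    by_cases hab : fget lab i = fget lab (j + n)
    · rw [if_neg (by simpa using hab), if_neg (by simpa using hab)]
      exact ⟨t, by omega, hInv2⟩
    · rw [if_pos (by simpa using hab), if_pos (by simpa using hab)]
      exact ⟨t + 1, le_refl _, UFInv.relabel n t p2 lab _ _ hInv2 li1 li2 li3 li4
        lj1 lj2 lj3 lj4 hab⟩
  · have hj0' : 0 ≤ j := by omega
    obtain ⟨p2, hp2, hInv2⟩ := find_correct' n t p1 lab j F hInv1 hj0' hj2 (by omega)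
    obtain ⟨⟨li1, li2, li3, li4⟩, -, -⟩ := hInv2.2.2 i hi0 hin
    obtain ⟨⟨lj1, lj2, lj3, lj4⟩, -, -⟩ := hInv2.2.2 j hj0' hj2
    unfold pvUnion
    rw [hp1]
    simp only [hp2]
    by_cases hab : fget lab i = fget lab j
    · rw [if_neg (by simpa using hab), if_neg (by simpa using hab)]
      exact ⟨t, by omega, hInv2⟩
    · rw [if_pos (by simpa using hab), if_pos (by simpa using hab)]
      exact ⟨t + 1, le_refl _, UFInv.relabel n t p2 lab _ _ hInv2 li1 li2 li3 li4
        lj1 lj2 lj3 lj4 hab⟩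

lemma loop_inner (n : Int) (F : Nat) (perm : List Int)
    (hperm : ∀ i : Int, 0 ≤ i → i < n → -n ≤ fget perm i ∧ fget perm i < n) :
    ∀ (l : List Int) (p lab : List Int) (t : Nat), (∀ i ∈ l, 0 ≤ i ∧ i < n) →
      UFInv n t p lab → t + l.length + 2 ≤ F →
      ∃ t' ≤ t + l.length,
        UFInv n t'
          (l.foldl (fun parent i => pvUnion F parent i (PySem.List.pyGetD perm i 0)) p)
          (l.foldl (fun label i =>
            let a := PySem.List.pyGetD label i 0
            let b := PySem.List.pyGetD label (PySem.List.pyGetD perm i 0) 0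
            if a ≠ b then label.map (fun x => if x = a then b else x) else label) lab) := by
  intro l
  induction l with
  | nil => intro p lab t _ hInv _; exact ⟨t, by simp, hInv⟩
  | cons i l ih =>
    intro p lab t hmem hInv hF
    obtain ⟨hi0, hin⟩ := hmem i (by simp)
    obtain ⟨hj1, hj2⟩ := hperm i hi0 hin
    obtain ⟨t1, ht1, hInv1⟩ := union_step n t F p lab i (fget perm i) hInv hi0 hin hj1 hj2
      (by simp at hF; omega)
    obtain ⟨t', ht', hInv'⟩ := ih _ _ t1 (fun w hw => hmem w (by simp [hw]))
      hInv1 (by simp at hF ⊢; omega)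
    exact ⟨t', by simp at ht' ⊢; omega, hInv'⟩

lemma loop_outer (n : Int) (F : Nat) :
    ∀ (ps : List (List Int)) (p lab : List Int) (t : Nat),
      (∀ perm ∈ ps, ∀ i : Int, 0 ≤ i → i < n → -n ≤ fget perm i ∧ fget perm i < n) →
      UFInv n t p lab → t + n.toNat * ps.length + 2 ≤ F →
      ∃ t' ≤ t + n.toNat * ps.length,
        UFInv n t'
          (ps.foldl (fun parent perm =>
            (PySem.List.pyRange 0 n 1).foldl
              (fun parent i => pvUnion F parent i (PySem.List.pyGetD perm i 0)) parent) p)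
          (ps.foldl (fun label perm =>
            (PySem.List.pyRange 0 n 1).foldl (fun label i =>
              let a := PySem.List.pyGetD label i 0
              let b := PySem.List.pyGetD label (PySem.List.pyGetD perm i 0) 0
              if a ≠ b then label.map (fun x => if x = a then b else x) else label) label) lab) := by
  intro ps
  induction ps with
  | nil => intro p lab t _ hInv _; exact ⟨t, by simp, hInv⟩
  | cons perm ps ih =>
    intro p lab t hps hInv hF
    have hlen : (PySem.List.pyRange 0 n 1).length = n.toNat := by
      rw [PySem.List.length_pyRange_one]; simp
    obtain ⟨t1, ht1, hInv1⟩ := loop_inner n F perm (hps perm (by simp))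
      (PySem.List.pyRange 0 n 1) p lab t
      (fun i hi => by
        obtain ⟨h1, h2⟩ := PySem.List.mem_pyRange_one.mp hi
        exact ⟨h1, h2⟩)
      hInv (by
        simp only [List.length_cons] at hF
        rw [Nat.mul_succ] at hF
        rw [hlen]; omega)
    rw [hlen] at ht1
    simp only [List.length_cons] at hF ⊢
    rw [Nat.mul_succ] at hF
    obtain ⟨t', ht', hInv'⟩ := ih _ _ t1 (fun q hq => hps q (by simp [hq]))
      hInv1 (by omega)
    exact ⟨t', by rw [Nat.mul_succ]; omega, hInv'⟩

lemma dict_setdefault_eq (d : PySem.Dict Int (List Int)) (k : Int) (v : List Int) :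
    PySem.Dict.setdefault d k v = if d.contains k = false then d.insert k v else d := by
  by_cases h : d.contains k
  · simp [PySem.Dict.setdefault, h]
  · simp only [PySem.Dict.setdefault, h]
    simp only [Bool.false_eq_true, if_false, if_true, eq_self_iff_true]
    apply PySem.Dict.ext
    rw [PySem.Dict.items_insert_of_not_contains d v (by simpa using h)]

lemma loop_group (n : Int) (F : Nat) (lab : List Int) :
    ∀ (l : List Int) (p : List Int) (orbs : PySem.Dict Int (List Int)) (t : Nat),
      (∀ i ∈ l, 0 ≤ i ∧ i < n) → UFInv n t p lab → t + 2 ≤ F →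
      (l.foldl (fun (st : List Int × PySem.Dict Int (List Int)) i =>
          let fr := pvFindGo F st.1 i
          let orbs := if st.2.contains fr.1 = false then st.2.insert fr.1 [] else st.2
          (fr.2, orbs.modify fr.1 [] (fun l => l ++ [i]))) (p, orbs)).2
        = l.foldl (fun orbs i =>
            (PySem.Dict.setdefault orbs (PySem.List.pyGetD lab i 0) []).modify
              (PySem.List.pyGetD lab i 0) [] (fun l => l ++ [i])) orbs := by
  intro l
  induction l with
  | nil => intro p orbs t _ _ _; rfl
  | cons i l ih =>
    intro p orbs t hmem hInv hF
    obtain ⟨hi0, hin⟩ := hmem i (by simp)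
    obtain ⟨p', hp', hInv'⟩ := find_correct' n t p lab i F hInv hi0 hin (by omega)
    have happ : (let fr := pvFindGo F (p, orbs).1 i
          let orbs' := if (p, orbs).2.contains fr.1 = false then (p, orbs).2.insert fr.1 [] else (p, orbs).2
          ((fr.2, orbs'.modify fr.1 [] (fun l => l ++ [i])) : List Int × PySem.Dict Int (List Int)))
        = (p', (if orbs.contains (PySem.List.pyGetD lab i 0) = false then
              orbs.insert (PySem.List.pyGetD lab i 0) [] else orbs).modify
            (PySem.List.pyGetD lab i 0) [] (fun l => l ++ [i])) := by
      simp only [hp', fget]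
    rw [List.foldl_cons, happ, ih p' _ t (fun w hw => hmem w (by simp [hw])) hInv' hF,
      List.foldl_cons, dict_setdefault_eq]

lemma init_inv (n : Int) (hn : 0 < n) :
    UFInv n 0 (PySem.List.pyRange 0 n 1) (PySem.List.pyRange 0 n 1) := by
  have hlen : (PySem.List.pyRange 0 n 1).length = n.toNat := by
    rw [PySem.List.length_pyRange_one]; simp
  have hid : ∀ x : Int, 0 ≤ x → x < n → fget (PySem.List.pyRange 0 n 1) x = x := by
    intro x hx0 hxn
    have hx : x.toNat < (PySem.List.pyRange 0 n 1).length := by omega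
    rw [fget_nonneg _ _ hx0 (by omega)]
    rw [getElem!_pos (PySem.List.pyRange 0 n 1) x.toNat hx, PySem.List.getElem_pyRange_one]
    omega
  refine ⟨hlen, hlen, ?_⟩
  intro x hx0 hxn
  rw [hid x hx0 hxn]
  exact ⟨⟨hx0, hxn, hid x hx0 hxn, hid x hx0 hxn⟩,
    ⟨hx0, hxn, by rw [hid x hx0 hxn]⟩, ⟨0, le_refl _, rfl⟩⟩

lemma pre_bounds (n : Int) (perm : List Int) (h1 : n ≤ (perm.length : Int))
    (h2 : ∀ x ∈ perm.take n.toNat, -n ≤ x ∧ x < n) :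
    ∀ i : Int, 0 ≤ i → i < n → -n ≤ fget perm i ∧ fget perm i < n := by
  intro i hi0 hin
  have hlt : i.toNat < perm.length := by omega
  have hg : fget perm i = perm[i.toNat] := by
    rw [fget_nonneg _ _ hi0 (by omega), getElem!_pos perm i.toNat hlt]
  rw [hg]
  apply h2
  have htl : i.toNat < (perm.take n.toNat).length := by
    rw [List.length_take]; omega
  have := List.getElem_mem htl
  rwa [List.getElem_take] at this

lemma ports_eq (perms : List (List Int)) (n : Int)
    (hPre : Pre_orbits_of_perms perms n) :
    orbits_of_perms perms n = orbits_of_perms_alt perms n := by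
  by_cases hn : n ≤ 0
  · simp only [orbits_of_perms, orbits_of_perms_alt,
      PySem.List.pyRange_one_eq_nil hn, List.foldl_nil, List.foldl_fixed]
  · push_neg at hn
    simp only [orbits_of_perms, orbits_of_perms_alt]
    set F := n.toNat * perms.length + 2 with hF
    obtain ⟨t', ht', hInv1⟩ := loop_outer n F perms (PySem.List.pyRange 0 n 1)
      (PySem.List.pyRange 0 n 1) 0
      (fun perm hperm => pre_bounds n perm (hPre perm hperm).1 (hPre perm hperm).2)
      (init_inv n hn) (by omega)
    rw [loop_group n F _ (PySem.List.pyRange 0 n 1) _ PySem.Dict.empty t'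
      (fun i hi => PySem.List.mem_pyRange_one.mp hi) hInv1 (by omega)]

-- ===== VERDICT (by name: the statement is the Claim_ definition above) =====
theorem orbits_of_perms_spec : Claim_equal_orbits_of_perms := by
  intro perms n _ hPre
  unfold Spec_orbits_of_perms
  exact ports_eq perms n hPre
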